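-- pv_equiv track=rewrite | github.com/DreamOfTheRedChamber/leetcode | Python/DFS/ZumaGame.py | removeTriplet
-- ===== SOURCE A (Python) =====
-- def removeTriplet(board: str) -> str:
--     stack = []
--
--     i = 0
--     while i < len(board):
--         char = board[i]
--         if not stack:
--             stack.append((char, 1))
--             i += 1
--         elif stack[-1][0] == char:
--             value, freq = stack.pop()
--             stack.append((value, freq + 1))
--             i += 1
--         else:  # stack[-1][0] != char:
--             if stack[-1][1] > 2:
--                 stack.pop()
--             else:
--                 stack.append((char, 1))
--                 i += 1
--
--     result = ""
--     while stack:
--         top = stack.pop()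
--         if top[1] <= 2:
--             result += top[0] * top[1]
--     return result[::-1]
-- ===== SOURCE B (Python) =====
-- def removeTriplet(board: str) -> str:
--     # Repeatedly delete the leftmost maximal run of >= 3 equal chars until none remains.
--     while True:
--         i = 0
--         n = len(board)
--         removed = False
--         while i < n:
--             j = i
--             while j < n and board[j] == board[i]:
--                 j += 1
--             if j - i >= 3:
--                 board = board[:i] + board[j:]
--                 removed = True
--                 break
--             i = j
--         if not removed:
--             return board
-- ===== Notes on version B (the rewrite author's own statement) =====
-- stated objective: simpler
-- what changed: Replaced A's single-pass stack of (char, frequency) pairs with index cascades by a plain loop that repeatedly scans the current string and deletes the leftmost maximal run of >= 3 equal characters until none remains.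
import Mathlib
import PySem

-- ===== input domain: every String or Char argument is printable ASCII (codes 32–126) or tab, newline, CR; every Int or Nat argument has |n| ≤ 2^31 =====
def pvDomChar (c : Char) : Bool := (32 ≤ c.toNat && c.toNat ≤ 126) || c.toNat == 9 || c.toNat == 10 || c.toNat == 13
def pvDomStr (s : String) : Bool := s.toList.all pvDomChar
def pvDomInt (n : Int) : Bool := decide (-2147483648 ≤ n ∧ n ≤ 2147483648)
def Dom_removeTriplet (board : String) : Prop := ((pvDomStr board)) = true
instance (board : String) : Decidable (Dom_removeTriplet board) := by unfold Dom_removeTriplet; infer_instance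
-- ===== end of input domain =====

-- B replaces A's (char, freq) stack with a plain loop deleting the leftmost maximal run of ≥ 3
-- equal chars until none remains: simpler, no pair stack (not claimed faster).

-- ===== PORT A =====
-- A's main while loop: stack head = Python stack top; the `f > 2` branch pops without advancing i.
def goA : List Char → List (Char × Nat) → List (Char × Nat)
  | [], st => st
  | c :: rest, st =>
    match st with
    | [] => goA rest [(c, 1)]
    | (v, f) :: tl =>
      if v = c then goA rest ((v, f + 1) :: tl)
      else if f > 2 then goA (c :: rest) tl
      else goA rest ((c, 1) :: (v, f) :: tl)
termination_by l st => (l.length, st.length)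

-- A's final while loop: pop, keep runs with freq ≤ 2 (res accumulates like Python's `result +=`).
def finA : List (Char × Nat) → List Char → List Char
  | [], res => res
  | (c, f) :: tl, res => finA tl (if f ≤ 2 then res ++ List.replicate f c else res)

def removeTriplet (board : String) : String :=
  -- result[::-1] on a string = character reversal (exact)
  String.mk ((finA (goA board.toList []) []).reverse)

-- ===== PORT B =====
-- One scan of B's outer `while i < n` pass: delete the leftmost maximal run of length ≥ 3
-- (takeWhile/dropWhile = the inner `while j < n and board[j] == board[i]` scan;
--  `board[:i] + board[j:]` = the kept prefix ++ the tail); none = no such run found.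
def delRun? : List Char → Option (List Char)
  | [] => none
  | c :: rest =>
    let run := rest.takeWhile (fun x => x = c)
    let rest' := rest.dropWhile (fun x => x = c)
    if run.length + 1 ≥ 3 then some rest'
    else
      match delRun? rest' with
      | some m => some (c :: (run ++ m))
      | none => none
termination_by l => l.length
decreasing_by
  have := List.length_dropWhile_le (fun x => x = c) rest
  simp; omega

-- termination measure of collapseB (cited by its `decreasing_by`)
theorem delRun?_length : ∀ (l m : List Char), delRun? l = some m → m.length < l.length
  | [], m, h => by simp [delRun?] at h
  | c :: rest, m, h => by
    have hlen := List.length_dropWhile_le (fun x => decide (x = c)) rest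
    have htw := congrArg List.length
      (List.takeWhile_append_dropWhile (p := fun x => decide (x = c)) (l := rest))
    rw [delRun?] at h
    by_cases hk : (rest.takeWhile (fun x => decide (x = c))).length + 1 ≥ 3
    · rw [if_pos hk] at h
      cases h
      simp at hlen ⊢
      omega
    · rw [if_neg hk] at h
      cases hrec : delRun? (rest.dropWhile (fun x => decide (x = c))) with
      | none => rw [hrec] at h; exact absurd h (by simp)
      | some m' =>
        rw [hrec] at h
        have ihm := delRun?_length (rest.dropWhile (fun x => decide (x = c))) m' hrec
        cases h
        rw [List.length_append] at htw
        simp only [List.length_cons, List.length_append]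
        omega
termination_by l => l.length
decreasing_by
  have := List.length_dropWhile_le (fun x => decide (x = c)) rest
  simp; omega

-- B's outer `while True` loop: repeat until no run of length ≥ 3 is found.
def collapseB (l : List Char) : List Char :=
  match h : delRun? l with
  | none => l
  | some m => collapseB m
termination_by l.length
decreasing_by exact delRun?_length l m h

def removeTriplet_alt (board : String) : String :=
  String.mk (collapseB board.toList)

-- ===== PRECONDITION & SPEC =====
def Spec_removeTriplet (board : String) (out : String) : Prop := out = removeTriplet_alt board
instance (board : String) (out : String) : Decidable (Spec_removeTriplet board out) := by unfold Spec_removeTriplet; infer_instance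

-- ===== CLAIM (what is proved, stated in full; the proofs are below) =====
def Claim_equal_removeTriplet : Prop := ∀ (board : String), Dom_removeTriplet board → Spec_removeTriplet board (removeTriplet board)

-- ===== LEMMAS AND PROOFS =====

-- "the stack may receive char c": empty, or top has a different char with freq ≤ 2
def okTopC (c : Char) : List (Char × Nat) → Prop
  | [] => True
  | (w, g) :: _ => w ≠ c ∧ g ≤ 2

theorem goA_rep : ∀ (k : Nat) (c : Char) (v : List Char) (f : Nat) (tl : List (Char × Nat)),
    goA (List.replicate k c ++ v) ((c, f) :: tl) = goA v ((c, f + k) :: tl) := by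
  intro k
  induction k with
  | zero => intro c v f tl; simp
  | succ n ih =>
    intro c v f tl
    rw [List.replicate_succ, List.cons_append, goA, if_pos rfl, ih]
    ring_nf

theorem goA_push (k : Nat) (c : Char) (v : List Char) (st : List (Char × Nat))
    (hk : 1 ≤ k) (hok : okTopC c st) :
    goA (List.replicate k c ++ v) st = goA v ((c, k) :: st) := by
  obtain ⟨k', rfl⟩ : ∃ k', k = k' + 1 := ⟨k - 1, by omega⟩
  rw [List.replicate_succ, List.cons_append]
  cases st with
  | nil => rw [goA, goA_rep]; ring_nf
  | cons p tl =>
    obtain ⟨w, g⟩ := p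
    obtain ⟨hw, hg⟩ := hok
    rw [goA, if_neg hw, if_neg (by omega), goA_rep]
    ring_nf

theorem finA_shift : ∀ (st : List (Char × Nat)) (res : List Char),
    finA st res = res ++ finA st [] := by
  intro st
  induction st with
  | nil => intro res; simp [finA]
  | cons p tl ih =>
    intro res
    obtain ⟨c, f⟩ := p
    rw [finA, finA, ih, ih (if f ≤ 2 then [] ++ List.replicate f c else [])]
    split_ifs <;> simp

theorem takeWhile_run (c : Char) (rest : List Char) :
    rest.takeWhile (fun x => decide (x = c)) =
      List.replicate (rest.takeWhile (fun x => decide (x = c))).length c := by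
  rw [List.eq_replicate_iff]
  refine ⟨rfl, ?_⟩
  intro b hb
  have := List.mem_takeWhile_imp hb
  simpa using this

theorem dropWhile_head : ∀ (l : List Char) (p : Char → Bool) (d : Char) (v : List Char),
    l.dropWhile p = d :: v → p d = false := by
  intro l
  induction l with
  | nil => intro p d v h; simp [List.dropWhile] at h
  | cons x xs ih =>
    intro p d v h
    cases hp : p x with
    | true =>
      simp only [List.dropWhile, hp] at h
      exact ih p d v h
    | false =>
      simp only [List.dropWhile, hp] at h
      obtain ⟨rfl, -⟩ := h
      exact hp

theorem run_decomp (c : Char) (rest : List Char) :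
    c :: rest = List.replicate ((rest.takeWhile (fun x => decide (x = c))).length + 1) c ++
      rest.dropWhile (fun x => decide (x = c)) := by
  rw [List.replicate_succ, List.cons_append]
  congr 1
  conv_lhs => rw [← List.takeWhile_append_dropWhile (p := fun x => decide (x = c)) (l := rest)]
  congr 1
  exact takeWhile_run c rest

theorem okTopC_tail (c : Char) (d : Char) (k : Nat) (st : List (Char × Nat))
    (hne : c ≠ d) (hk : k ≤ 2) : okTopC d ((c, k) :: st) := ⟨hne, hk⟩

theorem clean_lemma : ∀ (l : List Char) (st : List (Char × Nat)),
    delRun? l = none → (∀ c, l.head? = some c → okTopC c st) →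
    finA (goA l st) [] = l.reverse ++ finA st []
  | [], st, _, _ => by simp [goA]
  | c :: rest, st, h, hok => by
    have hkcase : ¬ ((rest.takeWhile (fun x => decide (x = c))).length + 1 ≥ 3) := by
      intro hge
      rw [delRun?, if_pos hge] at h
      exact absurd h (by simp)
    have hrec : delRun? (rest.dropWhile (fun x => decide (x = c))) = none := by
      rw [delRun?, if_neg hkcase] at h
      cases hd : delRun? (rest.dropWhile (fun x => decide (x = c))) with
      | none => rfl
      | some m' => rw [hd] at h; exact absurd h (by simp)
    have hokc : okTopC c st := hok c rfl
    rw [run_decomp c rest, goA_push _ _ _ _ (by omega) hokc]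
    rw [clean_lemma (rest.dropWhile (fun x => decide (x = c)))
        ((c, (rest.takeWhile (fun x => decide (x = c))).length + 1) :: st) hrec ?_]
    · rw [finA, if_pos (by omega), finA_shift, List.reverse_append, List.reverse_replicate]
      simp
    · intro d hd
      cases hrest : rest.dropWhile (fun x => decide (x = c)) with
      | nil => rw [hrest] at hd; simp at hd
      | cons d' v' =>
        rw [hrest] at hd
        simp at hd
        subst hd
        have := dropWhile_head rest _ d' v' hrest
        exact okTopC_tail c d' _ st (by simpa [eq_comm] using this) (by omega)
termination_by l => l.length
decreasing_by
  have := List.length_dropWhile_le (fun x => decide (x = c)) rest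
  simp; omega

theorem del_lemma : ∀ (l m : List Char) (st : List (Char × Nat)),
    delRun? l = some m → (∀ c, l.head? = some c → okTopC c st) →
    finA (goA l st) [] = finA (goA m st) []
  | [], m, st, h, _ => by simp [delRun?] at h
  | c :: rest, m, st, h, hok => by
    have hokc : okTopC c st := hok c rfl
    rw [delRun?] at h
    by_cases hk : (rest.takeWhile (fun x => decide (x = c))).length + 1 ≥ 3
    · rw [if_pos hk] at h
      cases h
      rw [run_decomp c rest, goA_push _ _ _ _ (by omega) hokc]
      cases hrest : rest.dropWhile (fun x => decide (x = c)) with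
      | nil => rw [goA, finA, if_neg (by omega), goA]
      | cons d v' =>
        have hd := dropWhile_head rest _ d v' hrest
        have hdc : ¬ (c = d) := by simpa [eq_comm] using hd
        rw [goA, if_neg hdc, if_pos (by omega)]
    · rw [if_neg hk] at h
      cases hrec : delRun? (rest.dropWhile (fun x => decide (x = c))) with
      | none => rw [hrec] at h; exact absurd h (by simp)
      | some m' =>
        rw [hrec] at h
        cases h
        have hok2 : ∀ d, (rest.dropWhile (fun x => decide (x = c))).head? = some d →
            okTopC d ((c, (rest.takeWhile (fun x => decide (x = c))).length + 1) :: st) := by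
          intro d hd
          cases hrest : rest.dropWhile (fun x => decide (x = c)) with
          | nil => rw [hrest] at hd; simp at hd
          | cons d' v' =>
            rw [hrest] at hd
            simp at hd
            subst hd
            have := dropWhile_head rest _ d' v' hrest
            exact okTopC_tail c d' _ st (by simpa [eq_comm] using this) (by omega)
        rw [run_decomp c rest, goA_push _ _ _ _ (by omega) hokc]
        rw [del_lemma (rest.dropWhile (fun x => decide (x = c))) m'
            ((c, (rest.takeWhile (fun x => decide (x = c))).length + 1) :: st) hrec hok2]
        have hm : c :: (rest.takeWhile (fun x => decide (x = c)) ++ m') =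
            List.replicate ((rest.takeWhile (fun x => decide (x = c))).length + 1) c ++ m' := by
          rw [List.replicate_succ, List.cons_append]
          congr 1
          conv_lhs => rw [takeWhile_run c rest]
        rw [hm, goA_push _ _ _ _ (by omega) hokc]
termination_by l m => l.length
decreasing_by
  have := List.length_dropWhile_le (fun x => decide (x = c)) rest
  simp; omega

theorem collapseB_none (l : List Char) (h : delRun? l = none) : collapseB l = l := by
  rw [collapseB]
  split
  · rfl
  · rename_i m hm; rw [h] at hm; exact absurd hm (by simp)

theorem collapseB_some (l m : List Char) (h : delRun? l = some m) :
    collapseB l = collapseB m := by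
  rw [collapseB]
  split
  · rename_i hn; rw [h] at hn; exact absurd hn (by simp)
  · rename_i m' hm; rw [h] at hm; cases hm; rfl

theorem main_lemma : ∀ (l : List Char), (finA (goA l []) []).reverse = collapseB l
  | l => by
    cases hd : delRun? l with
    | none =>
      rw [collapseB_none l hd,
        clean_lemma l [] hd (by intro c _; cases l <;> trivial)]
      simp [finA]
    | some m =>
      rw [collapseB_some l m hd,
        del_lemma l m [] hd (by intro c _; cases l <;> trivial)]
      exact main_lemma m
termination_by l => l.length
decreasing_by exact delRun?_length l m hd

-- ===== VERDICT (by name: the statement is the Claim_ definition above) =====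
theorem removeTriplet_spec : Claim_equal_removeTriplet := by
  intro board _
  unfold Spec_removeTriplet removeTriplet removeTriplet_alt
  rw [main_lemma]
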